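-- pv_equiv track=rewrite | github.com/pypi-data/pypi-mirror-404 | packages/aiptx/aiptx-3.6.0.tar.gz/aiptx-3.6.0/src/aipt_v2/core/agent.py | _extract_objective
-- ===== SOURCE A (Python) =====
-- def _extract_objective(llm_response: str) -> str:
--     """Extract objective from LLM response"""
--     lines = llm_response.split("\n")
--     for line in lines:
--         if "OBJECTIVE:" in line.upper():
--             return line.split(":", 1)[1].strip()
--
--     for line in reversed(lines):
--         if line.strip() and len(line.strip()) > 10:
--             return line.strip()
--
--     return "Continue reconnaissance"
-- ===== SOURCE B (Python) =====
-- def _extract_objective(llm_response: str) -> str: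
--     """Single forward pass: return at the first OBJECTIVE: line, otherwise
--     remember the last sufficiently long stripped line as the candidate."""
--     candidate = None
--     for line in llm_response.split("\n"):
--         if "OBJECTIVE:" in line.upper():
--             return line.split(":", 1)[1].strip()
--         stripped = line.strip()
--         if len(stripped) > 10:
--             candidate = stripped
--     return candidate if candidate is not None else "Continue reconnaissance"
-- ===== Notes on version B (the rewrite author's own statement) =====
-- stated objective: simpler
-- what changed: A's two sequential loops (a forward early-return scan, then a scan over reversed(lines)) are merged into one forward pass that keeps a running last-long-line candidate, so the list is traversed once and never reversed.
import Mathlib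
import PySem

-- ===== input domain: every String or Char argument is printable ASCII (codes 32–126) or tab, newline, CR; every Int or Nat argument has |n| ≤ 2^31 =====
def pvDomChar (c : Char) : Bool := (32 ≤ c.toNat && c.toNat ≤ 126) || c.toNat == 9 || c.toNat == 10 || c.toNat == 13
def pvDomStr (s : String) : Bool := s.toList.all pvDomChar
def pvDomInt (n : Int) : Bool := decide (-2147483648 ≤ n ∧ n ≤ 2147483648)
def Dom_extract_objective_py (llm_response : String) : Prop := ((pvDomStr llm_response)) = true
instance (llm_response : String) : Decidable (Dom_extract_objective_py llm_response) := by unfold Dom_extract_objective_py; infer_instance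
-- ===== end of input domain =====

-- B replaces A's two sequential loops (forward early-return scan, then a reversed scan)
-- by one forward pass carrying a 'last long line' candidate; return value only, no side effects.

-- ===== PORT A =====
-- line.split(":", 1)[1].strip() — the [1] cannot raise when "OBJECTIVE:" is in line.upper()
-- (the line then contains ':', so the split has two pieces); the .getD defaults are unreachable.
def aObjValue (line : String) : String :=
  PySem.Str.strip ((PySem.List.pyGet? ((PySem.Str.splitMax? line ":" 1).getD []) 1).getD "")

-- first loop: early return on the first OBJECTIVE: line
def aLoop1 : List String → Option String
  | [] => none
  | line :: t =>
    if PySem.Str.isIn "OBJECTIVE:" (PySem.Str.upper line) then some (aObjValue line)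
    else aLoop1 t

-- second loop: over reversed(lines), return the first line with truthy strip of length > 10
def aLoop2 : List String → String
  | [] => "Continue reconnaissance"
  | line :: t =>
    if PySem.Str.strip line ≠ "" ∧ 10 < PySem.Str.len (PySem.Str.strip line) then
      PySem.Str.strip line
    else aLoop2 t

-- llm_response.split("\n"): sep ≠ "" so split? is always some; the default is unreachable
def extract_objective_py (llm_response : String) : String :=
  match aLoop1 ((PySem.Str.split? llm_response "\n").getD []) with
  | some r => r
  | none => aLoop2 ((PySem.Str.split? llm_response "\n").getD []).reverse

-- ===== PORT B =====
def bObjValue (line : String) : String :=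
  PySem.Str.strip ((PySem.List.pyGet? ((PySem.Str.splitMax? line ":" 1).getD []) 1).getD "")

-- single forward pass with a running candidate (last long stripped line wins)
def bLoop : List String → Option String → String
  | [], cand => cand.getD "Continue reconnaissance"
  | line :: t, cand =>
    if PySem.Str.isIn "OBJECTIVE:" (PySem.Str.upper line) then bObjValue line
    else
      let stripped := PySem.Str.strip line
      if 10 < PySem.Str.len stripped then bLoop t (some stripped)
      else bLoop t cand

def extract_objective_py_alt (llm_response : String) : String :=
  bLoop ((PySem.Str.split? llm_response "\n").getD []) none

-- ===== PRECONDITION & SPEC =====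
def Spec_extract_objective_py (llm_response : String) (out : String) : Prop := out = extract_objective_py_alt llm_response
instance (llm_response : String) (out : String) : Decidable (Spec_extract_objective_py llm_response out) := by unfold Spec_extract_objective_py; infer_instance

-- ===== CLAIM (what is proved, stated in full; the proofs are below) =====
def Claim_equal_extract_objective_py : Prop := ∀ (llm_response : String), Dom_extract_objective_py llm_response → Spec_extract_objective_py llm_response (extract_objective_py llm_response)

-- ===== LEMMAS AND PROOFS =====

-- the two ports extract the same value from an OBJECTIVE: line
theorem objValue_eq (line : String) : aObjValue line = bObjValue line := rfl

-- the body of A's second loop as an Option (some = this line is returned)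
def good? (l : String) : Option String :=
  if PySem.Str.strip l ≠ "" ∧ 10 < PySem.Str.len (PySem.Str.strip l) then
    some (PySem.Str.strip l)
  else none

-- A's second loop, returning an Option (none = fell through to the default)
def aLoop2? : List String → Option String
  | [] => none
  | line :: t => (good? line).or (aLoop2? t)

theorem aLoop2_eq_aLoop2? (ls : List String) :
    aLoop2 ls = (aLoop2? ls).getD "Continue reconnaissance" := by
  induction ls with
  | nil => rfl
  | cons l t ih =>
    show (if _ then _ else aLoop2 t) = ((good? l).or (aLoop2? t)).getD _
    unfold good?
    by_cases hc : PySem.Str.strip l ≠ "" ∧ 10 < PySem.Str.len (PySem.Str.strip l)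
    · rw [if_pos hc, if_pos hc, Option.some_or, Option.getD_some]
    · rw [if_neg hc, if_neg hc, Option.none_or, ih]

-- a stripped line of length > 10 is automatically nonempty
theorem good?_of_long (l : String) (h : 10 < PySem.Str.len (PySem.Str.strip l)) :
    good? l = some (PySem.Str.strip l) := by
  refine if_pos ⟨fun he => ?_, h⟩
  rw [he] at h
  simp [PySem.Str.len] at h

theorem good?_of_short (l : String) (h : ¬ 10 < PySem.Str.len (PySem.Str.strip l)) :
    good? l = none :=
  if_neg (fun hc => h hc.2)

-- first-match over xs ++ [l] checks xs first, then l
theorem aLoop2?_append_singleton (xs : List String) (l : String) :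
    aLoop2? (xs ++ [l]) = (aLoop2? xs).or (good? l) := by
  induction xs with
  | nil => show (good? l).or none = _; rw [Option.or_none]; rfl
  | cons x t ih =>
    show (good? x).or (aLoop2? (t ++ [l])) = ((good? x).or (aLoop2? t)).or (good? l)
    rw [ih, Option.or_assoc]

-- core invariant: when no OBJECTIVE: line occurs, B's forward pass computes
-- "first good line of the reverse, else the candidate, else the default"
theorem bLoop_of_aLoop1_none (ls : List String) (cand : Option String)
    (h : aLoop1 ls = none) :
    bLoop ls cand = ((aLoop2? ls.reverse).or cand).getD "Continue reconnaissance" := by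
  induction ls generalizing cand with
  | nil => cases cand <;> rfl
  | cons l t ih =>
    unfold aLoop1 at h
    by_cases hm : PySem.Str.isIn "OBJECTIVE:" (PySem.Str.upper l) = true
    · rw [if_pos hm] at h; exact absurd h (by simp)
    · rw [if_neg hm] at h
      show (if _ then _ else _) = _
      rw [if_neg hm, List.reverse_cons, aLoop2?_append_singleton]
      by_cases hg : 10 < PySem.Str.len (PySem.Str.strip l)
      · rw [if_pos hg, ih (some (PySem.Str.strip l)) h, good?_of_long l hg,
          Option.or_assoc, Option.some_or]
      · rw [if_neg hg, ih cand h, good?_of_short l hg, Option.or_none]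

-- when the first loop fires, B returns the same extracted value regardless of candidate
theorem bLoop_of_aLoop1_some (ls : List String) (cand : Option String) (r : String)
    (h : aLoop1 ls = some r) : bLoop ls cand = r := by
  induction ls generalizing cand with
  | nil => exact absurd h (by simp [aLoop1])
  | cons l t ih =>
    unfold aLoop1 at h
    by_cases hm : PySem.Str.isIn "OBJECTIVE:" (PySem.Str.upper l) = true
    · rw [if_pos hm, Option.some_inj] at h
      show (if _ then _ else _) = r
      rw [if_pos hm, ← h, objValue_eq]
    · rw [if_neg hm] at h
      show (if _ then _ else _) = r
      rw [if_neg hm]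
      by_cases hg : 10 < PySem.Str.len (PySem.Str.strip l)
      · rw [if_pos hg]; exact ih _ h
      · rw [if_neg hg]; exact ih _ h

-- ===== VERDICT (by name: the statement is the Claim_ definition above) =====
theorem extract_objective_py_spec : Claim_equal_extract_objective_py := by
  intro s _
  unfold Spec_extract_objective_py extract_objective_py extract_objective_py_alt
  cases h : aLoop1 ((PySem.Str.split? s "\n").getD []) with
  | none =>
    show aLoop2 _ = _
    rw [aLoop2_eq_aLoop2?, bLoop_of_aLoop1_none _ none h, Option.or_none]
  | some r =>
    show r = _
    rw [bLoop_of_aLoop1_some _ none r h]
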